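-- pv_equiv track=rewrite | github.com/dewittn/qbasic-90s-time-capsule | my-programs/math-helpers/MATH3.py | find_factorization
-- ===== SOURCE A (Python) =====
-- def find_factorization(leading_coef: int, middle_coef: int, constant: int) -> tuple[int, int, int, int] | None:
--     """
--     Find a factorization for ax² + bx + c.
--
--     Searches for p, q, m, n such that:
--     - p * q = a (factor pairs of leading coefficient)
--     - m * n = c (factor pairs of constant)
--     - p*n + q*m = b (cross multiplication gives middle term)
--
--     Returns (p, m, q, n) for (px + m)(qx + n) if found, None if unfactorable.
--     """
--     if leading_coef == 0 or constant == 0: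
--         return None
--
--     # Try all factor pairs of the leading coefficient
--     for first_leading_factor in range(1, abs(leading_coef) + 1):
--         for second_leading_factor in range(1, abs(leading_coef) + 1):
--             if first_leading_factor * second_leading_factor != leading_coef:
--                 continue
--
--             # Now try factor pairs of constant based on signs
--             if middle_coef > 0:
--                 if constant > 0:
--                     # Both constant factors positive
--                     for first_const_factor in range(1, abs(constant) + 1):
--                         for second_const_factor in range(1, abs(constant) + 1):
--                             if (first_const_factor * second_const_factor == constant and
--                                 (first_const_factor * second_leading_factor) +
--                                     (second_const_factor * first_leading_factor) == middle_coef):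
--                                 return (first_leading_factor, first_const_factor,
--                                         second_leading_factor, second_const_factor)
--                 else:
--                     # constant < 0: constant factors have opposite signs
--                     for first_const_factor in range(-1, constant - 1, -1):
--                         for second_const_factor in range(-1, constant - 1, -1):
--                             if (first_const_factor * -second_const_factor == constant and
--                                 (first_const_factor * second_leading_factor) +
--                                     (-second_const_factor * first_leading_factor) == middle_coef):
--                                 return (first_leading_factor, -first_const_factor,
--                                         second_leading_factor, -second_const_factor)
--             else:
--                 # middle_coef <= 0
--                 if constant > 0:
--                     # Both constant factors negative (to get negative middle)
--                     for first_const_factor in range(1, abs(constant) + 1):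
--                         for second_const_factor in range(1, abs(constant) + 1):
--                             if ((-first_const_factor) * (-second_const_factor) == constant and
--                                 (-first_const_factor * second_leading_factor) +
--                                     (-second_const_factor * leading_coef) == middle_coef):
--                                 return (first_leading_factor, -first_const_factor,
--                                         second_leading_factor, -second_const_factor)
--                 else:
--                     # constant < 0: constant factors have opposite signs
--                     for first_const_factor in range(-1, constant - 1, -1):
--                         for second_const_factor in range(-1, constant - 1, -1):
--                             if ((-first_const_factor) * second_const_factor == constant and
--                                 (-first_const_factor * second_leading_factor) +
--                                     (second_const_factor * first_leading_factor) == middle_coef):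
--                                 return (first_leading_factor, first_const_factor,
--                                         second_leading_factor, -second_const_factor)
--
--     return None
-- ===== SOURCE B (Python) =====
-- def find_factorization(leading_coef: int, middle_coef: int, constant: int):
--     # Enumerate only divisors: p over divisors of a with cofactor q = a // p,
--     # m over divisors of |c| with cofactor n = |c| // m; check the cross term directly.
--     a, b, c = leading_coef, middle_coef, constant
--     if a <= 0 or c == 0:
--         return None
--     k = abs(c)
--     for p in range(1, a + 1):
--         if a % p:
--             continue
--         q = a // p
--         for m in range(1, k + 1):
--             if k % m:
--                 continue
--             n = k // m
--             if b > 0: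
--                 if c > 0:
--                     if m * q + n * p == b:
--                         return (p, m, q, n)
--                 elif n * p - m * q == b:
--                     return (p, m, q, n)
--             elif c > 0:
--                 if -(m * q) - n * p == b:
--                     return (p, -m, q, -n)
--             elif m * q - n * p == b:
--                 return (p, -m, q, n)
--     return None
-- ===== Notes on version B (the rewrite author's own statement) =====
-- stated objective: faster
-- what changed: B enumerates only the divisors of the leading coefficient and of |constant|, computing each cofactor by one division, instead of A's nested scans over all candidate pairs; B also checks the cross term with the cofactor everywhere.
-- intended difference: On inputs with middle_coef <= 0 and constant > 0 where the genuine or A's mis-scaled cross-term relation is satisfiable with leading_coef >= 2, A's branch tests -m*q - n*leading_coef == b (the whole leading coefficient instead of the cofactor p), so A can return a tuple that is not a factorization (e.g. (1,-1,2,-1) for 2x^2-4x+1) or None where one exists, while B tests -m*q - n*p == b and returns a genuine factorization or None, which is the intended behaviour per the docstring p*n + q*m = b. — e.g. on find_factorization(2, -4, 1): A returns some (1, -1, 2, -1), B returns none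
import Mathlib
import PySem

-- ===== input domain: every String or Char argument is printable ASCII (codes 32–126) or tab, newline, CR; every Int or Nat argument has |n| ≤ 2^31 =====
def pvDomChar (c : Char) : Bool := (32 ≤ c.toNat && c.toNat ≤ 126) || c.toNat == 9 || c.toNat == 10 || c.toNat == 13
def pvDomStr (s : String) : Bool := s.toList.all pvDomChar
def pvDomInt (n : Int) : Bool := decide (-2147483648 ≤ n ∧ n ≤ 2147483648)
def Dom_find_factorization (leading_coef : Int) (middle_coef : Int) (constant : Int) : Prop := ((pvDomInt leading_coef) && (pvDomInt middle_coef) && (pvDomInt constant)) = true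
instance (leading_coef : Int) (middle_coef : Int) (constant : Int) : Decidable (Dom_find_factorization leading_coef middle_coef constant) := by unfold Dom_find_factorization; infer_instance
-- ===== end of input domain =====

-- B replaces A's brute-force scan over all candidate pairs by enumeration of divisors with
-- computed cofactors (objective: faster), and checks the cross term with the cofactor in every
-- branch; the stated intended difference D_ covers A's mis-scaled branch.

-- ===== PORT A =====
def find_factorization (leading_coef : Int) (middle_coef : Int) (constant : Int) : Option (Int × Int × Int × Int) :=
  if leading_coef = 0 ∨ constant = 0 then none
  else
    (PySem.List.pyRange 1 (|leading_coef| + 1) 1).findSome? (fun flf =>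
      (PySem.List.pyRange 1 (|leading_coef| + 1) 1).findSome? (fun slf =>
        if flf * slf ≠ leading_coef then none
        else if middle_coef > 0 then
          if constant > 0 then
            (PySem.List.pyRange 1 (|constant| + 1) 1).findSome? (fun fcf =>
              (PySem.List.pyRange 1 (|constant| + 1) 1).findSome? (fun scf =>
                if fcf * scf = constant ∧ fcf * slf + scf * flf = middle_coef then
                  some (flf, fcf, slf, scf) else none))
          else
            (PySem.List.pyRange (-1) (constant - 1) (-1)).findSome? (fun fcf =>
              (PySem.List.pyRange (-1) (constant - 1) (-1)).findSome? (fun scf =>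
                if fcf * (-scf) = constant ∧ fcf * slf + (-scf) * flf = middle_coef then
                  some (flf, -fcf, slf, -scf) else none))
        else
          if constant > 0 then
            (PySem.List.pyRange 1 (|constant| + 1) 1).findSome? (fun fcf =>
              (PySem.List.pyRange 1 (|constant| + 1) 1).findSome? (fun scf =>
                if (-fcf) * (-scf) = constant ∧ (-fcf) * slf + (-scf) * leading_coef = middle_coef then
                  some (flf, -fcf, slf, -scf) else none))
          else
            (PySem.List.pyRange (-1) (constant - 1) (-1)).findSome? (fun fcf =>
              (PySem.List.pyRange (-1) (constant - 1) (-1)).findSome? (fun scf =>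
                if (-fcf) * scf = constant ∧ (-fcf) * slf + scf * flf = middle_coef then
                  some (flf, fcf, slf, -scf) else none))))

-- ===== PORT B =====
def find_factorization_alt (leading_coef : Int) (middle_coef : Int) (constant : Int) : Option (Int × Int × Int × Int) :=
  if leading_coef ≤ 0 ∨ constant = 0 then none
  else
    let k := |constant|
    (PySem.List.pyRange 1 (leading_coef + 1) 1).findSome? (fun p =>
      if PySem.Int.mod leading_coef p ≠ 0 then none
      else
        let q := PySem.Int.floordiv leading_coef p
        (PySem.List.pyRange 1 (k + 1) 1).findSome? (fun m =>
          if PySem.Int.mod k m ≠ 0 then none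
          else
            let n := PySem.Int.floordiv k m
            if middle_coef > 0 then
              if constant > 0 then
                if m * q + n * p = middle_coef then some (p, m, q, n) else none
              else
                if n * p - m * q = middle_coef then some (p, m, q, n) else none
            else if constant > 0 then
              if -(m * q) - n * p = middle_coef then some (p, -m, q, -n) else none
            else
              if m * q - n * p = middle_coef then some (p, -m, q, n) else none))

-- ===== PRECONDITION & SPEC =====
-- On inputs with middle_coef ≤ 0, constant > 0, leading_coef ≥ 2 where some divisor pair
-- (q of leading_coef, m of constant) satisfies the genuine cross-term relation
-- m*q + n*p = -middle_coef (p, n the cofactors) or A's mis-scaled relation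
-- m*q + n*leading_coef = -middle_coef, A tests the cross term with the whole leading
-- coefficient instead of the cofactor, so A can return a tuple that is not a factorization
-- (e.g. (1,-1,2,-1) for 2x²-4x+1) or None where one exists; B returns a genuine
-- factorization or None, the intended behaviour.  (Divisors are enumerated up to the
-- square root, as d or its cofactor a/d, so the condition is quickly decidable.)
def D_find_factorization (leading_coef : Int) (middle_coef : Int) (constant : Int) : Prop :=
  middle_coef ≤ 0 ∧ 0 < constant ∧ 2 ≤ leading_coef ∧
  ∃ d ∈ PySem.List.pyRange 1 ((leading_coef.toNat.sqrt : Int) + 1) 1, d ∣ leading_coef ∧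
  ∃ e ∈ PySem.List.pyRange 1 ((constant.toNat.sqrt : Int) + 1) 1, e ∣ constant ∧
  ∃ q ∈ [d, leading_coef / d], ∃ m ∈ [e, constant / e],
    (m * q + (constant / m) * (leading_coef / q) = -middle_coef ∨
     m * q + (constant / m) * leading_coef = -middle_coef)
instance (leading_coef : Int) (middle_coef : Int) (constant : Int) : Decidable (D_find_factorization leading_coef middle_coef constant) := by unfold D_find_factorization; infer_instance

def Spec_find_factorization (leading_coef : Int) (middle_coef : Int) (constant : Int) (out : Option (Int × Int × Int × Int)) : Prop := ¬ D_find_factorization leading_coef middle_coef constant → out = find_factorization_alt leading_coef middle_coef constant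
instance (leading_coef : Int) (middle_coef : Int) (constant : Int) (out : Option (Int × Int × Int × Int)) : Decidable (Spec_find_factorization leading_coef middle_coef constant out) := by unfold Spec_find_factorization; infer_instance

def pvDiffWitness_find_factorization : Int × Int × Int := (2, -4, 1)
def pvDiffWitnessOut_find_factorization : (Option (Int × Int × Int × Int)) × (Option (Int × Int × Int × Int)) := (some (1, -1, 2, -1), none)

-- ===== CLAIM (what is proved, stated in full; the proofs are below) =====
def Claim_unchanged_find_factorization : Prop := ∀ (leading_coef : Int) (middle_coef : Int) (constant : Int), Dom_find_factorization leading_coef middle_coef constant → Spec_find_factorization leading_coef middle_coef constant (find_factorization leading_coef middle_coef constant)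
def Claim_changed_find_factorization : Prop := Dom_find_factorization (pvDiffWitness_find_factorization.1) (pvDiffWitness_find_factorization.2.1) (pvDiffWitness_find_factorization.2.2) ∧ D_find_factorization (pvDiffWitness_find_factorization.1) (pvDiffWitness_find_factorization.2.1) (pvDiffWitness_find_factorization.2.2) ∧ find_factorization (pvDiffWitness_find_factorization.1) (pvDiffWitness_find_factorization.2.1) (pvDiffWitness_find_factorization.2.2) = pvDiffWitnessOut_find_factorization.1 ∧ find_factorization_alt (pvDiffWitness_find_factorization.1) (pvDiffWitness_find_factorization.2.1) (pvDiffWitness_find_factorization.2.2) = pvDiffWitnessOut_find_factorization.2 ∧ pvDiffWitnessOut_find_factorization.1 ≠ pvDiffWitnessOut_find_factorization.2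

def Claim_exact_find_factorization : Prop := ∀ (leading_coef : Int) (middle_coef : Int) (constant : Int), Dom_find_factorization leading_coef middle_coef constant → D_find_factorization leading_coef middle_coef constant → find_factorization leading_coef middle_coef constant ≠ find_factorization_alt leading_coef middle_coef constant

-- ===== LEMMAS AND PROOFS =====

-- findSome? over a list of pointwise-equal functions
theorem ff_findSome?_congr {α β : Type} (l : List α) (f g : α → Option β)
    (h : ∀ x ∈ l, f x = g x) : l.findSome? f = l.findSome? g := by
  induction l with
  | nil => rfl
  | cons x t ih =>
    simp only [List.findSome?_cons, h x (List.mem_cons_self)]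
    cases g x with
    | some b => rfl
    | none => exact ih (fun y hy => h y (List.mem_cons_of_mem _ hy))

-- findSome? of a guard that can fire at most at q0
theorem ff_findSome?_unique {β : Type} (l : List Int) (f : Int → Option β) (q0 : Int)
    (hmem : q0 ∈ l) (h : ∀ x ∈ l, x ≠ q0 → f x = none) : l.findSome? f = f q0 := by
  induction l with
  | nil => cases hmem
  | cons x t ih =>
    by_cases hx : x = q0
    · subst hx
      simp only [List.findSome?_cons]
      cases hfx : f x with
      | some b => rfl
      | none =>
        exact List.findSome?_eq_none_iff.2 (fun y hy => by
          by_cases hyq : y = x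
          · exact hyq ▸ hfx
          · exact h y (List.mem_cons_of_mem _ hy) hyq)
    · have hq0t : q0 ∈ t := by
        rcases List.mem_cons.1 hmem with h1 | h1
        · exact absurd h1.symm hx
        · exact h1
      simp only [List.findSome?_cons, h x (List.mem_cons_self) hx]
      exact ih hq0t (fun y hy hyq => h y (List.mem_cons_of_mem _ hy) hyq)

-- collapsing a scan for the cofactor: positive range
theorem ff_collapse_pos {β : Type} (d m : Int) (hd : 0 < d) (hm : 1 ≤ m) (g : Int → Option β) :
    (PySem.List.pyRange 1 (d + 1) 1).findSome? (fun n => if m * n = d then g n else none)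
      = if PySem.Int.mod d m = 0 then g (PySem.Int.floordiv d m) else none := by
  have hm0 : m ≠ 0 := by omega
  rw [PySem.Int.mod_eq_emod_of_pos (by omega), PySem.Int.floordiv_eq_ediv_of_pos (by omega)]
  by_cases hdvd : m ∣ d
  · have hq0 : m * (d / m) = d := Int.mul_ediv_cancel' hdvd
    have h1 : 1 ≤ d / m := by
      rcases hdvd with ⟨e, he⟩
      have : 0 < e := by nlinarith
      rw [he, Int.mul_ediv_cancel_left _ hm0]; omega
    have h2 : d / m ≤ d := by
      rcases hdvd with ⟨e, he⟩
      rw [he, Int.mul_ediv_cancel_left _ hm0]; nlinarith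
    rw [ff_findSome?_unique _ _ (d / m)
        (PySem.List.mem_pyRange_one.2 ⟨h1, by omega⟩)
        (fun x _ hx => if_neg (fun hmx => hx (by
          have := hq0; nlinarith [mul_left_cancel₀ hm0 (hmx.trans hq0.symm)])))]
    rw [if_pos hq0, if_pos ((PySem.Int.emod_eq_zero_iff_dvd _ _).mpr hdvd)]
  · rw [if_neg (fun h => hdvd ((PySem.Int.emod_eq_zero_iff_dvd _ _).mp h))]
    rw [List.findSome?_eq_none_iff.2]
    intro x _
    exact if_neg (fun hmx => hdvd ⟨x, hmx.symm⟩)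

-- collapsing a scan for the cofactor: negative countdown range  range(-1, c-1, -1)
theorem ff_collapse_neg {β : Type} (c i : Int) (hc : c < 0) (hi : 1 ≤ i) (g : Int → Option β) :
    (PySem.List.pyRange (-1) (c - 1) (-1)).findSome? (fun n => if i * n = c then g n else none)
      = if PySem.Int.mod c i = 0 then g (PySem.Int.floordiv c i) else none := by
  have hi0 : i ≠ 0 := by omega
  rw [PySem.Int.mod_eq_emod_of_pos (by omega), PySem.Int.floordiv_eq_ediv_of_pos (by omega)]
  by_cases hdvd : i ∣ c
  · have hq0 : i * (c / i) = c := Int.mul_ediv_cancel' hdvd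
    have h1 : c / i ≤ -1 := by
      rcases hdvd with ⟨e, he⟩
      have : e < 0 := by nlinarith
      rw [he, Int.mul_ediv_cancel_left _ hi0]; omega
    have h2 : c ≤ c / i := by
      rcases hdvd with ⟨e, he⟩
      rw [he, Int.mul_ediv_cancel_left _ hi0]; nlinarith
    rw [ff_findSome?_unique _ _ (c / i)
        (PySem.List.mem_pyRange_neg_one.2 ⟨by omega, by omega⟩)
        (fun x _ hx => if_neg (fun hix => hx (mul_left_cancel₀ hi0 (hix.trans hq0.symm))))]
    rw [if_pos hq0, if_pos ((PySem.Int.emod_eq_zero_iff_dvd _ _).mpr hdvd)]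
  · rw [if_neg (fun h => hdvd ((PySem.Int.emod_eq_zero_iff_dvd _ _).mp h))]
    rw [List.findSome?_eq_none_iff.2]
    intro x _
    exact if_neg (fun hix => hdvd ⟨x, hix.symm⟩)

-- Branch b>0, c>0: both constant factors positive
theorem ff_branch1 (p q b c : Int) (hc : 0 < c) :
    (PySem.List.pyRange 1 (|c| + 1) 1).findSome? (fun fcf =>
      (PySem.List.pyRange 1 (|c| + 1) 1).findSome? (fun scf =>
        if fcf * scf = c ∧ fcf * q + scf * p = b then some (p, fcf, q, scf) else none))
    = (PySem.List.pyRange 1 (|c| + 1) 1).findSome? (fun i =>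
        if PySem.Int.mod |c| i ≠ 0 then none
        else if i * q + (PySem.Int.floordiv |c| i) * p = b then
          some (p, i, q, PySem.Int.floordiv |c| i) else none) := by
  have habs : |c| = c := abs_of_pos hc
  rw [habs]
  apply ff_findSome?_congr
  intro m hm
  have hm1 : 1 ≤ m := (PySem.List.mem_pyRange_one.1 hm).1
  rw [ff_findSome?_congr _ _
      (fun n => if m * n = c then (if m * q + n * p = b then some (p, m, q, n) else none) else none)
      (fun n _ => by by_cases h1 : m * n = c <;> by_cases h2 : m * q + n * p = b <;> simp [h1, h2])]
  rw [ff_collapse_pos c m hc hm1]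
  by_cases h : PySem.Int.mod c m = 0 <;> simp [h]

-- exact division: (-c)/i from c/i
theorem ff_floordiv_neg (c i : Int) (hi : 1 ≤ i) (hdvd : PySem.Int.mod c i = 0) :
    PySem.Int.floordiv (-c) i = -(PySem.Int.floordiv c i) ∧ PySem.Int.mod (-c) i = 0 := by
  have hi0 : (i : Int) ≠ 0 := by omega
  have hd : i ∣ c := (PySem.Int.mod_eq_zero_iff_dvd c i).mp hdvd
  rcases hd with ⟨e, he⟩
  subst he
  rw [PySem.Int.floordiv_eq_ediv_of_pos (by omega), PySem.Int.floordiv_eq_ediv_of_pos (by omega),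
      PySem.Int.mod_eq_emod_of_pos (by omega)]
  constructor
  · rw [show -(i * e) = i * (-e) from by ring, Int.mul_ediv_cancel_left _ hi0,
        Int.mul_ediv_cancel_left _ hi0]
  · exact (PySem.Int.emod_eq_zero_iff_dvd _ _).mpr ⟨-e, by ring⟩

theorem ff_mod_neg_zero (c i : Int) : PySem.Int.mod (-c) i = 0 ↔ PySem.Int.mod c i = 0 := by
  rw [PySem.Int.mod_eq_zero_iff_dvd, PySem.Int.mod_eq_zero_iff_dvd, dvd_neg]

-- Branch b>0, c<0: countdown ranges, constant factors of opposite signs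
theorem ff_branch2 (p q b c : Int) (hc : c < 0) :
    (PySem.List.pyRange (-1) (c - 1) (-1)).findSome? (fun fcf =>
      (PySem.List.pyRange (-1) (c - 1) (-1)).findSome? (fun scf =>
        if fcf * (-scf) = c ∧ fcf * q + (-scf) * p = b then some (p, -fcf, q, -scf) else none))
    = (PySem.List.pyRange 1 (|c| + 1) 1).findSome? (fun i =>
        if PySem.Int.mod |c| i ≠ 0 then none
        else if (PySem.Int.floordiv |c| i) * p - i * q = b then
          some (p, i, q, PySem.Int.floordiv |c| i) else none) := by
  have habs : |c| = -c := abs_of_neg hc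
  have hr : PySem.List.pyRange (-1) (c - 1) (-1)
      = (List.range (-c).toNat).map (fun k : Nat => -1 - (k : Int)) := by
    rw [PySem.List.pyRange_neg_one, show (-1 - (c - 1)) = -c from by ring]
  rw [habs, PySem.List.pyRange_one, show (-c + 1 - 1) = -c from by ring]
  conv_lhs => rw [hr]
  rw [List.findSome?_map, List.findSome?_map]
  apply ff_findSome?_congr
  intro t _
  simp only [Function.comp]
  have hi1 : (1 : Int) ≤ 1 + (t : Int) := by omega
  rw [ff_findSome?_congr _ _
      (fun scf => if (1 + (t : Int)) * scf = c then
        (if (-1 - (t : Int)) * q + (-scf) * p = b then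
          some (p, -(-1 - (t : Int)), q, -scf) else none) else none)
      (fun n _ => by
        rw [show (-1 - (t : Int)) * (-n) = (1 + (t : Int)) * n from by ring]
        by_cases h1 : (1 + (t : Int)) * n = c <;> simp [h1])]
  rw [← hr, ff_collapse_neg c (1 + (t : Int)) hc hi1]
  by_cases hmod : PySem.Int.mod c (1 + (t : Int)) = 0
  · obtain ⟨hfd, hmod'⟩ := ff_floordiv_neg c (1 + (t : Int)) hi1 hmod
    rw [hfd]
    rw [show (-1 - (t : Int)) * q + (-(PySem.Int.floordiv c (1 + (t : Int)))) * p
          = (-(PySem.Int.floordiv c (1 + (t : Int)))) * p - (1 + (t : Int)) * q from by ring,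
        show -(-1 - (t : Int)) = 1 + (t : Int) from by ring]
    simp [hmod, hmod']
  · have hmod' : ¬ PySem.Int.mod (-c) (1 + (t : Int)) = 0 :=
      fun h => hmod ((ff_mod_neg_zero c _).mp h)
    simp [hmod, hmod']

-- Branch b≤0, c>0, A's side: constant factors negated, A's middle test uses the coefficient w
theorem ff_branch3 (p q b c w : Int) (hc : 0 < c) :
    (PySem.List.pyRange 1 (|c| + 1) 1).findSome? (fun fcf =>
      (PySem.List.pyRange 1 (|c| + 1) 1).findSome? (fun scf =>
        if (-fcf) * (-scf) = c ∧ (-fcf) * q + (-scf) * w = b then some (p, -fcf, q, -scf) else none))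
    = (PySem.List.pyRange 1 (|c| + 1) 1).findSome? (fun i =>
        if PySem.Int.mod |c| i ≠ 0 then none
        else if -(i * q) - (PySem.Int.floordiv |c| i) * w = b then
          some (p, -i, q, -(PySem.Int.floordiv |c| i)) else none) := by
  have habs : |c| = c := abs_of_pos hc
  rw [habs]
  apply ff_findSome?_congr
  intro m hm
  have hm1 : 1 ≤ m := (PySem.List.mem_pyRange_one.1 hm).1
  rw [ff_findSome?_congr _ _
      (fun n => if m * n = c then (if -(m * q) - n * w = b then some (p, -m, q, -n) else none) else none)
      (fun n _ => by
        rw [show (-m) * (-n) = m * n from by ring, show (-m) * q + (-n) * w = -(m * q) - n * w from by ring]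
        by_cases h1 : m * n = c <;> by_cases h2 : -(m * q) - n * w = b <;> simp [h1, h2])]
  rw [ff_collapse_pos c m hc hm1]
  by_cases h : PySem.Int.mod c m = 0 <;> simp [h]

-- Branch b≤0, c<0
theorem ff_branch4 (p q b c : Int) (hc : c < 0) :
    (PySem.List.pyRange (-1) (c - 1) (-1)).findSome? (fun fcf =>
      (PySem.List.pyRange (-1) (c - 1) (-1)).findSome? (fun scf =>
        if (-fcf) * scf = c ∧ (-fcf) * q + scf * p = b then some (p, fcf, q, -scf) else none))
    = (PySem.List.pyRange 1 (|c| + 1) 1).findSome? (fun i =>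
        if PySem.Int.mod |c| i ≠ 0 then none
        else if i * q - (PySem.Int.floordiv |c| i) * p = b then
          some (p, -i, q, PySem.Int.floordiv |c| i) else none) := by
  have habs : |c| = -c := abs_of_neg hc
  have hr : PySem.List.pyRange (-1) (c - 1) (-1)
      = (List.range (-c).toNat).map (fun k : Nat => -1 - (k : Int)) := by
    rw [PySem.List.pyRange_neg_one, show (-1 - (c - 1)) = -c from by ring]
  rw [habs, PySem.List.pyRange_one, show (-c + 1 - 1) = -c from by ring]
  conv_lhs => rw [hr]
  rw [List.findSome?_map, List.findSome?_map]
  apply ff_findSome?_congr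
  intro t _
  simp only [Function.comp]
  have hi1 : (1 : Int) ≤ 1 + (t : Int) := by omega
  rw [ff_findSome?_congr _ _
      (fun scf => if (1 + (t : Int)) * scf = c then
        (if (-(-1 - (t : Int))) * q + scf * p = b then
          some (p, -1 - (t : Int), q, -scf) else none) else none)
      (fun n _ => by
        rw [show (-(-1 - (t : Int))) * n = (1 + (t : Int)) * n from by ring]
        by_cases h1 : (1 + (t : Int)) * n = c <;> simp [h1])]
  rw [← hr, ff_collapse_neg c (1 + (t : Int)) hc hi1]
  by_cases hmod : PySem.Int.mod c (1 + (t : Int)) = 0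
  · obtain ⟨hfd, hmod'⟩ := ff_floordiv_neg c (1 + (t : Int)) hi1 hmod
    rw [hfd]
    rw [show (-(-1 - (t : Int))) * q + (PySem.Int.floordiv c (1 + (t : Int))) * p
          = (1 + (t : Int)) * q - (-(PySem.Int.floordiv c (1 + (t : Int)))) * p from by ring]
    simp [hmod, hmod']
    ring_nf
  · have hmod' : ¬ PySem.Int.mod (-c) (1 + (t : Int)) = 0 :=
      fun h => hmod ((ff_mod_neg_zero c _).mp h)
    simp [hmod, hmod']

-- a number d with d*d ≤ n lies in the √-bounded range of D_find_factorization
theorem ff_mem_sqrt (n d : Int) (hn : 1 ≤ n) (hd : 1 ≤ d) (hdd : d * d ≤ n) :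
    d ∈ PySem.List.pyRange 1 ((n.toNat.sqrt : Int) + 1) 1 := by
  have h1' : ((d.toNat : Int)) = d := Int.toNat_of_nonneg (by omega)
  have h2' : ((n.toNat : Int)) = n := Int.toNat_of_nonneg (by omega)
  have h3' : ((d.toNat * d.toNat : Nat) : Int) ≤ ((n.toNat : Nat) : Int) := by
    push_cast [h1', h2']
    exact hdd
  have hle : d.toNat ≤ Nat.sqrt n.toNat := Nat.le_sqrt.2 (by exact_mod_cast h3')
  exact PySem.List.mem_pyRange_one.2 ⟨hd, by omega⟩

-- every positive divisor q of n is reached as d or as the cofactor n/d of some d ≤ √n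
theorem ff_div_witness (n q : Int) (hn : 1 ≤ n) (h1 : 1 ≤ q) (hq : q ∣ n) :
    ∃ d ∈ PySem.List.pyRange 1 ((n.toNat.sqrt : Int) + 1) 1, d ∣ n ∧ q ∈ [d, n / d] := by
  obtain ⟨e, he⟩ := hq
  have he1 : 1 ≤ e := by nlinarith
  by_cases hs : q * q ≤ n
  · exact ⟨q, ff_mem_sqrt n q hn h1 hs, ⟨e, he⟩, List.mem_cons_self⟩
  · have hlt : e < q := by nlinarith
    have hee : e * e ≤ n := by nlinarith
    have he0 : e ≠ 0 := by omega
    have hne : n / e = q := by rw [he, mul_comm, Int.mul_ediv_cancel_left _ he0]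
    refine ⟨e, ff_mem_sqrt n e hn he1 hee, ⟨q, by rw [he]; ring⟩, ?_⟩
    rw [hne]
    exact List.mem_cons_of_mem _ List.mem_cons_self

-- assembling the existential part of D_find_factorization from one divisor pair
theorem ff_exists_pair (a c q m : Int) (P : Int → Int → Prop) (ha : 1 ≤ a) (hc : 1 ≤ c)
    (h1 : 1 ≤ q) (h3 : q ∣ a) (h4 : 1 ≤ m) (h6 : m ∣ c) (hP : P q m) :
    ∃ d ∈ PySem.List.pyRange 1 ((a.toNat.sqrt : Int) + 1) 1, d ∣ a ∧
    ∃ e ∈ PySem.List.pyRange 1 ((c.toNat.sqrt : Int) + 1) 1, e ∣ c ∧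
    ∃ q' ∈ [d, a / d], ∃ m' ∈ [e, c / e], P q' m' := by
  obtain ⟨d, hd, hdd, hqm⟩ := ff_div_witness a q ha h1 h3
  obtain ⟨e, he, hee, hmm⟩ := ff_div_witness c m hc h4 h6
  exact ⟨d, hd, hdd, e, he, hee, q, hqm, m, hmm, hP⟩

-- A's scan over slf collapses to the unique cofactor d // p
theorem ff_collapseA {β : Type} (d p : Int) (hd : 0 < d) (hp : 1 ≤ p) (g : Int → Option β) :
    (PySem.List.pyRange 1 (d + 1) 1).findSome? (fun q => if p * q ≠ d then none else g q)
      = if PySem.Int.mod d p ≠ 0 then none else g (PySem.Int.floordiv d p) := by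
  rw [ff_findSome?_congr _ _ (fun q => if p * q = d then g q else none)
      (fun q _ => by by_cases h : p * q = d <;> simp [h]),
    ff_collapse_pos d p hd hp]
  by_cases h : PySem.Int.mod d p = 0 <;> simp [h]

-- ===== tightness machinery: A ≠ B everywhere inside D_find_factorization =====

-- the inner constant-factor scan of the b ≤ 0, c > 0 branch, with cross-term coefficient w
def ffScanW (a b c p w : Int) : Option (Int × Int × Int × Int) :=
  (PySem.List.pyRange 1 (|c| + 1) 1).findSome? (fun i =>
    if PySem.Int.mod |c| i ≠ 0 then none
    else if -(i * PySem.Int.floordiv a p) - PySem.Int.floordiv |c| i * w = b then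
      some (p, -i, PySem.Int.floordiv a p, -(PySem.Int.floordiv |c| i)) else none)

theorem ff_of_findSome?_some {α β : Type} (l : List α) (f : α → Option β) (r : β)
    (h : l.findSome? f = some r) : ∃ x ∈ l, f x = some r := by
  induction l with
  | nil => simp [List.findSome?] at h
  | cons x t ih =>
    rw [List.findSome?_cons] at h
    cases hfx : f x with
    | some v =>
      rw [hfx] at h
      exact ⟨x, List.mem_cons_self, hfx.trans (by simpa using h)⟩
    | none =>
      rw [hfx] at h
      obtain ⟨y, hy, hfy⟩ := ih (by simpa using h)
      exact ⟨y, List.mem_cons_of_mem _ hy, hfy⟩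

-- A's value in the b ≤ 0, c > 0 branch, as an outer scan of ffScanW with w = a
theorem ff_A_form (a b c : Int) (ha : 0 < a) (hb : ¬ 0 < b) (hc : 0 < c) :
    find_factorization a b c
      = (PySem.List.pyRange 1 (a + 1) 1).findSome? (fun p =>
          if PySem.Int.mod a p ≠ 0 then none else ffScanW a b c p a) := by
  unfold find_factorization
  rw [if_neg (by omega), abs_of_pos ha]
  apply ff_findSome?_congr
  intro p hp
  have hp1 : 1 ≤ p := (PySem.List.mem_pyRange_one.1 hp).1
  rw [ff_collapseA a p ha hp1]
  by_cases hdp : PySem.Int.mod a p = 0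
  · simp only [hdp, ne_eq, not_true_eq_false, if_false]
    simp only [hb, hc, if_true, if_false]
    rw [ff_branch3 p (PySem.Int.floordiv a p) b c a hc]
    rfl
  · simp [hdp]

-- B's value in the b ≤ 0, c > 0 branch, as an outer scan of ffScanW with w = p
theorem ff_B_form (a b c : Int) (ha : 0 < a) (hb : ¬ 0 < b) (hc : 0 < c) :
    find_factorization_alt a b c
      = (PySem.List.pyRange 1 (a + 1) 1).findSome? (fun p =>
          if PySem.Int.mod a p ≠ 0 then none else ffScanW a b c p p) := by
  unfold find_factorization_alt
  rw [if_neg (by omega)]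
  apply ff_findSome?_congr
  intro p _
  by_cases hdp : PySem.Int.mod a p = 0
  · simp only [hdp, ne_eq, not_true_eq_false, if_false]
    unfold ffScanW
    apply ff_findSome?_congr
    intro i _
    by_cases hmi : PySem.Int.mod |c| i = 0
    · simp only [hmi, ne_eq, not_true_eq_false, if_false, hb, hc, if_true, if_false]
    · simp [hmi]
  · simp [hdp]

-- what a successful inner scan returns
theorem ff_scan_sound (a b c p w : Int) (hc : 0 < c) (r : Int × Int × Int × Int)
    (h : ffScanW a b c p w = some r) :
    ∃ i n, 1 ≤ i ∧ 1 ≤ n ∧ i * n = c ∧ r = (p, -i, PySem.Int.floordiv a p, -n) ∧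
      -(i * PySem.Int.floordiv a p) - n * w = b := by
  obtain ⟨i, hi, hbody⟩ := ff_of_findSome?_some _ _ _ h
  have hi1 : 1 ≤ i := (PySem.List.mem_pyRange_one.1 hi).1
  by_cases hmi : PySem.Int.mod |c| i = 0
  · simp only [hmi, ne_eq, not_true_eq_false, if_false] at hbody
    by_cases hcond : -(i * PySem.Int.floordiv a p) - PySem.Int.floordiv |c| i * w = b
    · rw [if_pos hcond] at hbody
      have hcc : |c| = c := abs_of_pos hc
      have hidvd : i ∣ c := by
        have := (PySem.Int.mod_eq_zero_iff_dvd |c| i).mp hmi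
        rwa [hcc] at this
      have hfd : PySem.Int.floordiv |c| i = c / i := by
        rw [hcc]; exact PySem.Int.floordiv_eq_ediv_of_pos (by omega)
      have hprod : i * (c / i) = c := Int.mul_ediv_cancel' hidvd
      have hn1 : 1 ≤ c / i := by nlinarith [hprod]
      refine ⟨i, c / i, hi1, hn1, hprod, ?_, ?_⟩
      · injection hbody with hv
        rw [← hv, hfd]
      · rw [← hfd]; exact hcond
    · rw [if_neg hcond] at hbody; cases hbody
  · simp [hmi] at hbody

-- the inner scan fires whenever some admissible pair satisfies the cross-term test
theorem ff_scan_fire (a b c p w i n : Int) (hc : 0 < c) (hi : 1 ≤ i) (hin : i * n = c)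
    (hcond : -(i * PySem.Int.floordiv a p) - n * w = b) : ffScanW a b c p w ≠ none := by
  intro h
  have hcc : |c| = c := abs_of_pos hc
  have hn1 : 1 ≤ n := by nlinarith
  have hmem : i ∈ PySem.List.pyRange 1 (|c| + 1) 1 :=
    PySem.List.mem_pyRange_one.2 ⟨hi, by rw [hcc]; nlinarith⟩
  have hbody := List.findSome?_eq_none_iff.1 h i hmem
  have hmi : PySem.Int.mod |c| i = 0 := by
    rw [hcc]; exact (PySem.Int.mod_eq_zero_iff_dvd c i).mpr ⟨n, hin.symm⟩
  have hfd : PySem.Int.floordiv |c| i = n := by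
    rw [hcc, PySem.Int.floordiv_eq_ediv_of_pos (by omega), ← hin,
      Int.mul_ediv_cancel_left _ (by omega : i ≠ 0)]
  simp only [hmi, ne_eq, not_true_eq_false, if_false, hfd] at hbody
  rw [if_pos hcond] at hbody
  cases hbody

-- ===== VERDICT (by name: the statements are the Claim_ definitions above) =====
theorem find_factorization_spec : Claim_unchanged_find_factorization := by
  intro a b c _
  unfold Spec_find_factorization find_factorization find_factorization_alt
  intro hD
  by_cases hc0 : c = 0
  · simp [hc0]
  by_cases hapos : 0 < a
  · rw [if_neg (by omega), if_neg (by omega), abs_of_pos hapos]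
    apply ff_findSome?_congr
    intro p hp
    have hp1 : 1 ≤ p := (PySem.List.mem_pyRange_one.1 hp).1
    have hp2 : p ≤ a := by have := (PySem.List.mem_pyRange_one.1 hp).2; omega
    rw [ff_collapseA a p hapos hp1]
    by_cases hdp : PySem.Int.mod a p = 0
    · simp only [hdp, ne_eq, not_true_eq_false, if_false]
      have hdvd : p ∣ a := (PySem.Int.mod_eq_zero_iff_dvd a p).mp hdp
      have hqdef : PySem.Int.floordiv a p = a / p :=
        PySem.Int.floordiv_eq_ediv_of_pos (by omega)
      have hpq : p * (a / p) = a := Int.mul_ediv_cancel' hdvd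
      have hq1 : 1 ≤ a / p := by
        rcases hdvd with ⟨e, he⟩
        have : 0 < e := by nlinarith
        rw [he, Int.mul_ediv_cancel_left _ (show p ≠ 0 by omega)]; omega
      have hqa : a / p ≤ a := by nlinarith
      by_cases hb : 0 < b <;> by_cases hcp : 0 < c
      · simp only [hb, hcp, if_true]
        exact ff_branch1 p (PySem.Int.floordiv a p) b c hcp
      · have hcn : c < 0 := by omega
        simp only [hb, hcp, if_true, if_false]
        exact ff_branch2 p (PySem.Int.floordiv a p) b c hcn
      · -- the sensitive branch: b ≤ 0 ∧ c > 0
        simp only [hb, hcp, if_true, if_false]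
        rw [ff_branch3 p (PySem.Int.floordiv a p) b c a hcp]
        by_cases ha1 : a = 1
        · have hp1' : p = 1 := by omega
          rw [ha1, hp1']
        · have ha2 : 2 ≤ a := by omega
          have hcc : |c| = c := abs_of_pos hcp
          have hnone : ∀ (w : Int), (∀ (i n : Int), 1 ≤ i → i * n = c →
                ¬ (i * (PySem.Int.floordiv a p) + n * w = -b)) →
              (PySem.List.pyRange 1 (|c| + 1) 1).findSome? (fun i =>
                if PySem.Int.mod |c| i ≠ 0 then none
                else if -(i * (PySem.Int.floordiv a p)) - (PySem.Int.floordiv |c| i) * w = b then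
                  some (p, -i, (PySem.Int.floordiv a p), -(PySem.Int.floordiv |c| i)) else none) = none := by
            intro w hw
            apply List.findSome?_eq_none_iff.2
            intro i hi
            have hi1 : 1 ≤ i := (PySem.List.mem_pyRange_one.1 hi).1
            by_cases hmi : PySem.Int.mod |c| i = 0
            · simp only [hmi, ne_eq, not_true_eq_false, if_false]
              apply if_neg
              intro heq
              have hidvd : i ∣ c := by
                have := (PySem.Int.mod_eq_zero_iff_dvd |c| i).mp hmi
                rwa [hcc] at this
              have hndef : PySem.Int.floordiv |c| i = c / i := by
                rw [hcc]; exact PySem.Int.floordiv_eq_ediv_of_pos (by omega)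
              have hin : i * (c / i) = c := Int.mul_ediv_cancel' hidvd
              exact hw i (c / i) hi1 hin (by rw [hndef] at heq; linarith)
            · simp [hmi]
          have hq0' : a / p ≠ 0 := by omega
          have hqp : (a / p) * p = a := by rw [mul_comm]; exact hpq
          have haq : a / (a / p) = p := by
            have h2 := Int.mul_ediv_cancel_left (b := p) hq0'
            rwa [hqp] at h2
          rw [hnone a ?_, hnone p ?_]
          · intro i n hi1 hin heq
            apply hD
            have hn1 : 1 ≤ n := by nlinarith
            have hi0 : i ≠ 0 := by omega
            have hci : c / i = n := by rw [← hin, Int.mul_ediv_cancel_left _ hi0]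
            refine ⟨by omega, hcp, ha2,
              ff_exists_pair a c (a / p) i _ (by omega) (by omega) hq1 ⟨p, hqp.symm⟩ hi1
                ⟨n, hin.symm⟩ (Or.inl ?_)⟩
            rw [hqdef] at heq
            simp only [hci, haq]
            linarith
          · intro i n hi1 hin heq
            apply hD
            have hn1 : 1 ≤ n := by nlinarith
            have hi0 : i ≠ 0 := by omega
            have hci : c / i = n := by rw [← hin, Int.mul_ediv_cancel_left _ hi0]
            refine ⟨by omega, hcp, ha2,
              ff_exists_pair a c (a / p) i _ (by omega) (by omega) hq1 ⟨p, hqp.symm⟩ hi1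
                ⟨n, hin.symm⟩ (Or.inr ?_)⟩
            rw [hqdef] at heq
            simp only [hci]
            linarith
      · have hcn : c < 0 := by omega
        simp only [hb, hcp, if_false]
        exact ff_branch4 p (PySem.Int.floordiv a p) b c hcn
    · simp [hdp]
  · rw [if_pos (show a ≤ 0 ∨ c = 0 from Or.inl (by omega))]
    by_cases ha0 : a = 0
    · rw [if_pos (show a = 0 ∨ c = 0 from Or.inl ha0)]
    · rw [if_neg (show ¬(a = 0 ∨ c = 0) from fun h => by rcases h with h | h <;> contradiction)]
      apply List.findSome?_eq_none_iff.2
      intro p hp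
      apply List.findSome?_eq_none_iff.2
      intro q hq
      have hp1 : 1 ≤ p := (PySem.List.mem_pyRange_one.1 hp).1
      have hq1 : 1 ≤ q := (PySem.List.mem_pyRange_one.1 hq).1
      have hpq : 0 < p * q := mul_pos (by omega) (by omega)
      rw [if_pos (show p * q ≠ a from fun h => by omega)]

theorem find_factorization_changed : Claim_changed_find_factorization := by
  unfold Claim_changed_find_factorization
  refine ⟨by decide, ⟨by decide, by decide, by decide,
    ff_exists_pair 2 1 2 1 _ (by decide) (by decide) (by decide) (by decide) (by decide)
      (by decide) (Or.inr (by decide))⟩, by decide, by decide, by decide⟩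

theorem find_factorization_tight : Claim_exact_find_factorization := by
  intro a b c _ hD hAB
  obtain ⟨hble, hc, ha2, d, hdmem, hddvd, e, hemem, hedvd, q, hqmem, m, hmmem, hrel⟩ := hD
  have ha : 0 < a := by omega
  have hb : ¬ 0 < b := by omega
  have hd1 : 1 ≤ d := (PySem.List.mem_pyRange_one.1 hdmem).1
  have he1 : 1 ≤ e := (PySem.List.mem_pyRange_one.1 hemem).1
  -- q is a genuine positive divisor of a, m of c
  have hq : q ∣ a ∧ 1 ≤ q := by
    rcases List.mem_cons.1 hqmem with h | h
    · exact ⟨h ▸ hddvd, h ▸ hd1⟩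
    · have h' : q = a / d := List.mem_singleton.1 h
      obtain ⟨t, ht⟩ := hddvd
      have htq : a / d = t := by rw [ht, Int.mul_ediv_cancel_left _ (by omega : d ≠ 0)]
      have ht1 : 1 ≤ t := by nlinarith
      exact ⟨by rw [h', htq]; exact ⟨d, by rw [ht]; ring⟩, by rw [h', htq]; exact ht1⟩
  have hm : m ∣ c ∧ 1 ≤ m := by
    rcases List.mem_cons.1 hmmem with h | h
    · exact ⟨h ▸ hedvd, h ▸ he1⟩
    · have h' : m = c / e := List.mem_singleton.1 h
      obtain ⟨t, ht⟩ := hedvd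
      have htq : c / e = t := by rw [ht, Int.mul_ediv_cancel_left _ (by omega : e ≠ 0)]
      have ht1 : 1 ≤ t := by nlinarith
      exact ⟨by rw [h', htq]; exact ⟨e, by rw [ht]; ring⟩, by rw [h', htq]; exact ht1⟩
  obtain ⟨hqdvd, hq1⟩ := hq
  obtain ⟨hmdvd, hm1⟩ := hm
  -- cofactors
  have hp0 : (a / q) * q = a := Int.ediv_mul_cancel hqdvd
  have hp01 : 1 ≤ a / q := by nlinarith
  have hp0a : a / q ≤ a := by nlinarith
  have hn0 : m * (c / m) = c := Int.mul_ediv_cancel' hmdvd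
  have hn01 : 1 ≤ c / m := by nlinarith
  have hp0dvd : (a / q) ∣ a := ⟨q, hp0.symm⟩
  have hmod0 : PySem.Int.mod a (a / q) = 0 := (PySem.Int.mod_eq_zero_iff_dvd a _).mpr hp0dvd
  have hfd0 : PySem.Int.floordiv a (a / q) = q := by
    rw [PySem.Int.floordiv_eq_ediv_of_pos (by omega)]
    have h2 := Int.mul_ediv_cancel_left (b := q) (by omega : a / q ≠ 0)
    rwa [hp0] at h2
  have hp0mem : a / q ∈ PySem.List.pyRange 1 (a + 1) 1 :=
    PySem.List.mem_pyRange_one.2 ⟨hp01, by omega⟩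
  rw [ff_A_form a b c ha hb hc, ff_B_form a b c ha hb hc] at hAB
  cases hval : (PySem.List.pyRange 1 (a + 1) 1).findSome? (fun p =>
      if PySem.Int.mod a p ≠ 0 then none else ffScanW a b c p a) with
  | none =>
    rw [hval] at hAB
    -- both scans at p = a/q are none, contradicting the satisfiable relation
    have hAs : ffScanW a b c (a / q) a = none := by
      have hbody := List.findSome?_eq_none_iff.1 hval (a / q) hp0mem
      simpa [hmod0] using hbody
    have hBs : ffScanW a b c (a / q) (a / q) = none := by
      have hbody := List.findSome?_eq_none_iff.1 hAB.symm (a / q) hp0mem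
      simpa [hmod0] using hbody
    rcases hrel with hrel | hrel
    · exact ff_scan_fire a b c (a / q) (a / q) m (c / m) hc hm1 hn0
        (by rw [hfd0]; linarith) hBs
    · exact ff_scan_fire a b c (a / q) a m (c / m) hc hm1 hn0
        (by rw [hfd0]; linarith) hAs
  | some r =>
    rw [hval] at hAB
    -- A returned r via some pA; B returned the same r via some pB; equal tuples force pA = a
    obtain ⟨pA, hpAmem, hbodyA⟩ := ff_of_findSome?_some _ _ _ hval
    by_cases hmA : PySem.Int.mod a pA = 0
    · simp only [hmA, ne_eq, not_true_eq_false, if_false] at hbodyA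
      obtain ⟨pB, hpBmem, hbodyB⟩ := ff_of_findSome?_some _ _ _ hAB.symm
      by_cases hmB : PySem.Int.mod a pB = 0
      · simp only [hmB, ne_eq, not_true_eq_false, if_false] at hbodyB
        obtain ⟨iA, nA, hiA1, hnA1, hinA, hrA, hcondA⟩ := ff_scan_sound a b c pA a hc r hbodyA
        obtain ⟨iB, nB, hiB1, hnB1, hinB, hrB, hcondB⟩ := ff_scan_sound a b c pB pB hc r hbodyB
        have heq := hrA.symm.trans hrB
        simp only [Prod.mk.injEq] at heq
        obtain ⟨hpe, hie, -, hne⟩ := heq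
        have hie' : iA = iB := by omega
        have hne' : nA = nB := by omega
        rw [← hpe] at hcondB
        rw [← hie', ← hne'] at hcondB
        -- subtracting the two conditions: nA * a = nA * pA, so pA = a
        have hnz : nA ≠ 0 := by omega
        have hpa : pA = a := by
          have h3 : nA * a = nA * pA := by linarith
          exact (mul_left_cancel₀ hnz h3).symm
        have hfdaa : PySem.Int.floordiv a pA = 1 := by
          rw [hpa, PySem.Int.floordiv_eq_ediv_of_pos ha, Int.ediv_self (by omega)]
        rw [hfdaa] at hcondA
        -- B fires already at p = 1 with the swapped pair, so r would start with 1, not a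
        have hfd1 : PySem.Int.floordiv a 1 = a := by
          rw [PySem.Int.floordiv_eq_ediv_of_pos one_pos, Int.ediv_one]
        have hfire := ff_scan_fire a b c 1 1 nA iA hc hnA1
          (by rw [mul_comm]; exact hinA) (by rw [hfd1]; linarith)
        have hcons : PySem.List.pyRange 1 (a + 1) 1 = 1 :: PySem.List.pyRange 2 (a + 1) 1 := by
          have := PySem.List.pyRange_one_cons (a := 1) (b := a + 1) (by omega)
          simpa using this
        have hm1' : PySem.Int.mod a 1 = 0 := (PySem.Int.mod_eq_zero_iff_dvd a 1).mpr (one_dvd a)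
        rw [hcons, List.findSome?_cons] at hAB
        simp only [hm1', ne_eq, not_true_eq_false, if_false] at hAB
        cases hscan : ffScanW a b c 1 1 with
        | none => exact hfire hscan
        | some r' =>
          rw [hscan] at hAB
          obtain ⟨i', n', -, -, -, hr', -⟩ := ff_scan_sound a b c 1 1 hc r' hscan
          have hr'r : r = r' := by
            cases hAB; rfl
          rw [hrA] at hr'r
          rw [hr'] at hr'r
          simp only [Prod.mk.injEq] at hr'r
          omega
      · simp [hmB] at hbodyB
    · simp [hmA] at hbodyA
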